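-- pv_equiv track=rewrite | github.com/JCWilde/projectDecrypt | bad_ciphers.py | decrypt4
-- ===== SOURCE A (Python) =====
-- def decrypt4(ptext, key):
--     alphabet = "abcdefghijklmnopqrstuvwxyz" * 2
--     ctext = ""
--     x = key
--     a = 12345
--     c = 3
--     m = 2 ** 12
--     for i in range(len(ptext)):
--         if ptext[i] in alphabet:
--             x = (a * x + c) % m
--             ctext += alphabet[(alphabet.index(ptext[i]) - x) % 26]
--         else:
--             ctext += ptext[i]
--     return ctext
-- ===== SOURCE B (Python) =====
-- def decrypt4(ptext, key):
--     a, c, m = 12345, 3, 2 ** 12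
--     ks = []
--     x = key
--     for ch in ptext:
--         if 'a' <= ch <= 'z':
--             x = (a * x + c) % m
--             ks.append(x)
--     out = []
--     j = 0
--     for ch in ptext:
--         if 'a' <= ch <= 'z':
--             out.append(chr((ord(ch) - 97 - ks[j]) % 26 + 97))
--             j += 1
--         else:
--             out.append(ch)
--     return ''.join(out)
-- ===== Notes on version B (the rewrite author's own statement) =====
-- stated objective: alternative
-- what changed: B splits A's single fused loop into two passes: one builds the list of successive LCG keystream states (advancing only on lowercase letters), and a second pass substitutes letters via ord-arithmetic (chr((ord(ch)-97-k)%26+97)) instead of A's doubled-alphabet string with repeated .index lookups and string concatenation.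
import Mathlib
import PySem

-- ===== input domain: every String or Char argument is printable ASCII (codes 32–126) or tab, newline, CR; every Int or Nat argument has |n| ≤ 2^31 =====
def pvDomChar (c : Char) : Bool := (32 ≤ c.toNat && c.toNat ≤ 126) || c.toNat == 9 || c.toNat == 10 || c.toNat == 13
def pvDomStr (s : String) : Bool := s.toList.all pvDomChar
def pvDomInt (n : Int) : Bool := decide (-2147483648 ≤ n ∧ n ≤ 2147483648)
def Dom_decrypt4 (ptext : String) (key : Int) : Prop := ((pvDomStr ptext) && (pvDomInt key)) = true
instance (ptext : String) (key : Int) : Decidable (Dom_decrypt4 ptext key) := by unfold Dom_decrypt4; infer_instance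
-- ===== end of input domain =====

-- B replaces A's single fused loop by two passes (keystream list, then substitution by
-- ord-arithmetic instead of doubled-alphabet .index lookups); same return value, no speed claim.

-- ===== PORT A =====
-- alphabet = "abcdefghijklmnopqrstuvwxyz" * 2
def pvAlphabet : List Char := "abcdefghijklmnopqrstuvwxyzabcdefghijklmnopqrstuvwxyz".toList

-- one iteration of A's for-loop: state = (ctext so far, x)
def pvStepA (st : List Char × Int) (ch : Char) : List Char × Int :=
  if pvAlphabet.contains ch then
    let x := PySem.Int.mod (12345 * st.2 + 3) 4096
    (st.1 ++ [PySem.List.pyGetD pvAlphabet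
        (PySem.Int.mod ((((PySem.List.index? pvAlphabet ch).getD 0 : Nat) : Int) - x) 26) ' '], x)
  else
    (st.1 ++ [ch], st.2)

def decrypt4 (ptext : String) (key : Int) : String :=
  String.ofList (ptext.toList.foldl pvStepA ([], key)).1

-- ===== PORT B =====
-- pass 1 of Source B: the successive LCG states, one per lowercase letter
def pvKeystream : List Char → Int → List Int
  | [], _ => []
  | ch :: rest, x =>
    if 'a' ≤ ch ∧ ch ≤ 'z' then
      let x' := PySem.Int.mod (12345 * x + 3) 4096
      x' :: pvKeystream rest x'
    else pvKeystream rest x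

-- pass 2 of Source B: consume the keystream pointer-wise (head = next ks[j])
def pvSubst : List Char → List Int → List Char
  | [], _ => []
  | ch :: rest, ks =>
    if 'a' ≤ ch ∧ ch ≤ 'z' then
      match ks with
      | k :: kt => Char.ofNat ((PySem.Int.mod ((ch.toNat : Int) - 97 - k) 26).toNat + 97) :: pvSubst rest kt
      | [] => ch :: pvSubst rest []   -- never reached: the keystream has one entry per letter
    else ch :: pvSubst rest ks

def decrypt4_alt (ptext : String) (key : Int) : String :=
  String.ofList (pvSubst ptext.toList (pvKeystream ptext.toList key))

-- ===== PRECONDITION & SPEC =====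
def Spec_decrypt4 (ptext : String) (key : Int) (out : String) : Prop := out = decrypt4_alt ptext key
instance (ptext : String) (key : Int) (out : String) : Decidable (Spec_decrypt4 ptext key out) := by unfold Spec_decrypt4; infer_instance

-- ===== CLAIM (what is proved, stated in full; the proofs are below) =====
def Claim_equal_decrypt4 : Prop := ∀ (ptext : String) (key : Int), Dom_decrypt4 ptext key → Spec_decrypt4 ptext key (decrypt4 ptext key)

-- ===== LEMMAS AND PROOFS =====

theorem pv_alpha_lit : pvAlphabet = ['a', 'b', 'c', 'd', 'e', 'f', 'g', 'h', 'i', 'j', 'k', 'l', 'm', 'n', 'o', 'p', 'q', 'r', 's', 't', 'u', 'v', 'w', 'x', 'y', 'z', 'a', 'b', 'c', 'd', 'e', 'f', 'g', 'h', 'i', 'j', 'k', 'l', 'm', 'n', 'o', 'p', 'q', 'r', 's', 't', 'u', 'v', 'w', 'x', 'y', 'z'] := by decide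

theorem pv_letter_iff (c : Char) : ('a' ≤ c ∧ c ≤ 'z') ↔ (97 ≤ c.toNat ∧ c.toNat ≤ 122) := by
  simp only [Char.le_def, UInt32.le_iff_toNat_le]
  exact Iff.rfl

theorem pv_contains_iff (c : Char) : pvAlphabet.contains c = true ↔ (97 ≤ c.toNat ∧ c.toNat ≤ 122) := by
  constructor
  · intro h
    rw [pv_alpha_lit, List.contains_eq_mem, decide_eq_true_eq] at h
    fin_cases h <;> decide
  · rintro ⟨h1, h2⟩
    have hc : c = Char.ofNat c.toNat := (Char.ofNat_toNat c).symm
    set n := c.toNat with hn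
    interval_cases n <;> rw [hc] <;> decide

theorem pv_index_eq (c : Char) (h1 : 97 ≤ c.toNat) (h2 : c.toNat ≤ 122) :
    PySem.List.index? pvAlphabet c = some (c.toNat - 97) := by
  have hc : c = Char.ofNat c.toNat := (Char.ofNat_toNat c).symm
  set n := c.toNat with hn
  interval_cases n <;> rw [hc] <;> decide

theorem pv_get_eq (r : Int) (h0 : 0 ≤ r) (h1 : r < 26) :
    PySem.List.pyGetD pvAlphabet r ' ' = Char.ofNat (r.toNat + 97) := by
  interval_cases r <;> decide

theorem pv_char_eq (ch : Char) (h1 : 97 ≤ ch.toNat) (h2 : ch.toNat ≤ 122) (x : Int) :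
    PySem.List.pyGetD pvAlphabet
        (PySem.Int.mod ((((PySem.List.index? pvAlphabet ch).getD 0 : Nat) : Int) - x) 26) ' '
      = Char.ofNat ((PySem.Int.mod ((ch.toNat : Int) - 97 - x) 26).toNat + 97) := by
  rw [pv_index_eq ch h1 h2]
  have harg : (((ch.toNat - 97 : Nat) : Int)) - x = (ch.toNat : Int) - 97 - x := by
    push_cast [h1]; ring
  simp only [Option.getD_some, harg]
  exact pv_get_eq _ (PySem.Int.mod_nonneg _ (by norm_num)) (PySem.Int.mod_lt _ (by norm_num))

theorem pv_fold_eq (cs : List Char) (x : Int) (acc : List Char) :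
    (cs.foldl pvStepA (acc, x)).1 = acc ++ pvSubst cs (pvKeystream cs x) := by
  induction cs generalizing x acc with
  | nil => simp [pvSubst]
  | cons ch rest ih =>
    by_cases h : 'a' ≤ ch ∧ ch ≤ 'z'
    · have hb : pvAlphabet.contains ch = true :=
        (pv_contains_iff ch).2 ((pv_letter_iff ch).1 h)
      obtain ⟨h1, h2⟩ := (pv_letter_iff ch).1 h
      simp only [List.foldl_cons, pvStepA, hb, pvKeystream, pvSubst, h, if_pos]
      rw [ih, pv_char_eq ch h1 h2]
      simp
    · have hb : pvAlphabet.contains ch = false := by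
        by_contra hcon
        exact h ((pv_letter_iff ch).2 ((pv_contains_iff ch).1 (by simpa using hcon)))
      simp only [List.foldl_cons, pvStepA, hb, Bool.false_eq_true,
        pvKeystream, pvSubst, h, if_neg, not_false_iff]
      rw [ih]
      simp

-- ===== VERDICT (by name: the statement is the Claim_ definition above) =====
theorem decrypt4_spec : Claim_equal_decrypt4 := by
  intro ptext key _
  unfold Spec_decrypt4 decrypt4 decrypt4_alt
  rw [pv_fold_eq]
  simp
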